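-- pv_equiv track=rewrite | github.com/pypi-data/pypi-mirror-284 | packages/easyRTML/easyRTML-1.6.6.tar.gz/easyRTML-1.6.6/easyRTML/rb.py | arrange_features
-- ===== SOURCE A (Python) =====
-- def arrange_features(selected_features):
--     """
--     Arrange selected features based on a naming convention.
--     """
--     arranged_features = []
--     feature_groups = {}
--
--     for feature in selected_features:
--         feature_name, _, indicator = feature.partition('_')
--         feature_groups.setdefault(feature_name, []).append((indicator, feature))
--
--     for feature_name, features in feature_groups.items():
--         features.sort(key=lambda x: x[0])
--         arranged_features.extend(feature for _, feature in features)
--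
--     return arranged_features
-- ===== SOURCE B (Python) =====
-- def arrange_features(selected_features):
--     """
--     Arrange selected features based on a naming convention.
--     """
--     group_index = {}
--     for feature in selected_features:
--         name = feature.partition('_')[0]
--         if name not in group_index:
--             group_index[name] = len(group_index)
--     return sorted(
--         selected_features,
--         key=lambda f: (group_index[f.partition('_')[0]], f.partition('_')[2]),
--     )
-- ===== Notes on version B (the rewrite author's own statement) =====
-- stated objective: alternative
-- what changed: B replaces A's dict-of-lists grouping plus per-group sorts and concatenation by one pass that records each group's first-appearance index and a single stable sort of the whole list keyed by (group index, indicator).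
import Mathlib
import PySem

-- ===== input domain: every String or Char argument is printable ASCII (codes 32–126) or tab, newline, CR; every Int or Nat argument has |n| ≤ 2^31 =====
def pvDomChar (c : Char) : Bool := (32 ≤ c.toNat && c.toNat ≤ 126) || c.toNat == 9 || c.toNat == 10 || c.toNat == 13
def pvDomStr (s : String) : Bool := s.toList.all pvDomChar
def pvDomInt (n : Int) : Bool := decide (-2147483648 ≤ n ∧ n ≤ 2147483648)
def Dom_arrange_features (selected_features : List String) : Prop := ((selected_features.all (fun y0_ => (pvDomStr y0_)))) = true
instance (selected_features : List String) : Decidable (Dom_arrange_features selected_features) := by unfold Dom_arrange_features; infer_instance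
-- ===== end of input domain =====

-- B groups by recording each prefix's first-appearance index once and doing a single stable sort
-- keyed by (group index, indicator), instead of A's dict-of-lists plus per-group sorts.

-- hand port of str.partition('_'): component 0 (text before the FIRST '_'; the whole string if none)
def pyPartName (f : String) : String := String.ofList (f.toList.takeWhile (fun c => c != '_'))
-- hand port of str.partition('_'): component 2 (text after the FIRST '_'; '' if none)
def pyPartAfter (f : String) : String := String.ofList ((f.toList.dropWhile (fun c => c != '_')).drop 1)

-- ===== PORT A =====
def arrange_features (selected_features : List String) : List String :=
  let feature_groups : PySem.Dict String (List (String × String)) :=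
    selected_features.foldl
      (fun d feature =>
        d.modify (pyPartName feature) [] (fun l => l ++ [(pyPartAfter feature, feature)]))
      PySem.Dict.empty
  feature_groups.items.foldl
    (fun arranged p =>
      arranged ++ (PySem.List.sorted p.2 (fun x => x.1) false).map (fun x => x.2))
    []

-- ===== PORT B =====
def arrange_features_alt (selected_features : List String) : List String :=
  let group_index : PySem.Dict String Int :=
    selected_features.foldl
      (fun d feature =>
        if d.contains (pyPartName feature) then d
        else d.insert (pyPartName feature) (d.size : Int))
      PySem.Dict.empty
  PySem.List.sorted2 selected_features
    (fun f => group_index.getD (pyPartName f) 0) (fun f => pyPartAfter f) false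

-- ===== PRECONDITION & SPEC =====
def Spec_arrange_features (selected_features : List String) (out : List String) : Prop := out = arrange_features_alt selected_features
instance (selected_features : List String) (out : List String) : Decidable (Spec_arrange_features selected_features out) := by unfold Spec_arrange_features; infer_instance

-- ===== CLAIM (what is proved, stated in full; the proofs are below) =====
def Claim_equal_arrange_features : Prop := ∀ (selected_features : List String), Dom_arrange_features selected_features → Spec_arrange_features selected_features (arrange_features selected_features)

-- ===== LEMMAS AND PROOFS =====

theorem insertBy_nil {α : Type} (b : α → α → Bool) (x : α) :
    PySem.List.insertBy b x [] = [x] := rfl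

theorem insertBy_cons {α : Type} (b : α → α → Bool) (x y : α) (l : List α) :
    PySem.List.insertBy b x (y :: l) = if b x y then x :: y :: l else y :: PySem.List.insertBy b x l := rfl

theorem insertBy_append_of_forall_false {α : Type} (b : α → α → Bool) (x : α) (l1 l2 : List α)
    (h : ∀ e ∈ l1, b x e = false) :
    PySem.List.insertBy b x (l1 ++ l2) = l1 ++ PySem.List.insertBy b x l2 := by
  induction l1 with
  | nil => rfl
  | cons y t ih =>
    rw [List.cons_append, insertBy_cons, if_neg (by simp [h y (by simp)]),
      ih (fun e he => h e (by simp [he])), List.cons_append]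

theorem insertBy_append_of_forall_true {α : Type} (b : α → α → Bool) (x : α) (l1 l2 : List α)
    (h : ∀ e ∈ l2, b x e = true) :
    PySem.List.insertBy b x (l1 ++ l2) = PySem.List.insertBy b x l1 ++ l2 := by
  induction l1 with
  | nil =>
    cases l2 with
    | nil => rfl
    | cons e t => rw [List.nil_append, insertBy_cons, if_pos (h e (by simp)), insertBy_nil]; rfl
  | cons y t ih =>
    by_cases hb : b x y = true
    · rw [List.cons_append, insertBy_cons, if_pos hb, insertBy_cons, if_pos hb]; rfl
    · rw [List.cons_append, insertBy_cons, if_neg hb, insertBy_cons, if_neg hb, ih, List.cons_append]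

theorem insertBy_congr {α : Type} (b b' : α → α → Bool) (x : α) (l : List α)
    (h : ∀ y ∈ l, b x y = b' x y) :
    PySem.List.insertBy b x l = PySem.List.insertBy b' x l := by
  induction l with
  | nil => rfl
  | cons y t ih =>
    rw [insertBy_cons, insertBy_cons, h y (by simp), ih (fun e he => h e (by simp [he]))]

theorem insertBy_map {α γ : Type} (b : α → α → Bool) (h : γ → α) (x : γ) (l : List γ) :
    PySem.List.insertBy b (h x) (l.map h)
      = (PySem.List.insertBy (fun a c => b (h a) (h c)) x l).map h := by
  induction l with
  | nil => rfl
  | cons y t ih =>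
    rw [List.map_cons, insertBy_cons, insertBy_cons]
    by_cases hb : b (h x) (h y) = true
    · rw [if_pos hb, if_pos hb, List.map_cons, List.map_cons]
    · rw [if_neg hb, if_neg hb, List.map_cons, ih]

theorem foldl_insertBy_map {α γ : Type} (b : α → α → Bool) (h : γ → α) :
    ∀ (l : List γ) (acc : List γ),
      l.foldl (fun a y => PySem.List.insertBy b (h y) a) (acc.map h)
        = (l.foldl (fun a y => PySem.List.insertBy (fun p q => b (h p) (h q)) y a) acc).map h := by
  intro l
  induction l with
  | nil => intro acc; rfl
  | cons y t ih =>
    intro acc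
    rw [List.foldl_cons, List.foldl_cons, insertBy_map, ih]

theorem sorted_map {γ α κ : Type} [LinearOrder κ] (h : γ → α) (key : α → κ) (l : List γ) :
    PySem.List.sorted (l.map h) key false
      = (PySem.List.sorted l (fun y => key (h y)) false).map h := by
  rw [PySem.List.sorted_eq_foldl_insertBy, PySem.List.sorted_eq_foldl_insertBy, List.foldl_map]
  exact foldl_insertBy_map _ h l []

theorem sorted2_eq_foldl {α : Type} (xs : List α) (k1 : α → Int) (k2 : α → String) :
    PySem.List.sorted2 xs k1 k2 false
      = xs.foldl (fun acc x => PySem.List.insertBy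
          (fun a b => decide (k1 a < k1 b) || (!decide (k1 b < k1 a) && decide (k2 a < k2 b))) x acc) [] := rfl

theorem flatten_map_nil {α β : Type} (l : List α) : (l.map (fun _ => ([] : List β))).flatten = [] := by
  induction l with
  | nil => rfl
  | cons y t _ => simp

theorem zipIdx_fst {α : Type} (l : List α) : ∀ k, (l.zipIdx k).map Prod.fst = l := by
  induction l with
  | nil => intro k; rfl
  | cons y t ih => intro k; simp [List.zipIdx_cons, ih]

theorem mem_block {α : Type} (g : α → String) (k2 : α → String) (xs : List α) (n : String) (e : α)
    (he : e ∈ PySem.List.sorted (xs.filter (fun x => g x == n)) k2 false) : g e = n ∧ e ∈ xs := by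
  rw [PySem.List.mem_sorted] at he
  rcases List.mem_filter.mp he with ⟨hmem, hbeq⟩
  exact ⟨by simpa using hbeq, hmem⟩

theorem sorted2_split {α : Type} (g : α → String) (K : String → Int) (k2 : α → String)
    (names : List String) (hinc : (names.map K).Pairwise (· < ·)) :
    ∀ xs : List α, (∀ x ∈ xs, g x ∈ names) →
      PySem.List.sorted2 xs (fun e => K (g e)) k2 false
        = (names.map (fun n => PySem.List.sorted (xs.filter (fun e => g e == n)) k2 false)).flatten := by
  intro xs
  induction xs using List.reverseRecOn with
  | nil =>
    intro _
    have h0 : PySem.List.sorted ([] : List α) k2 false = [] := rfl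
    rw [sorted2_eq_foldl]
    simp only [List.foldl_nil, List.filter_nil, h0, flatten_map_nil]
  | append_singleton xs x ih =>
    intro hg
    have hgx : g x ∈ names := hg x (by simp)
    obtain ⟨pre, post, hnames⟩ := List.append_of_mem hgx
    have hpw : ((pre.map K) ++ K (g x) :: (post.map K)).Pairwise (· < ·) := by
      have := hinc; rw [hnames] at this; simpa using this
    have hpre : ∀ n ∈ pre, K n < K (g x) := by
      intro n hn
      exact (List.pairwise_append.mp hpw).2.2 (K n) (List.mem_map_of_mem hn) (K (g x)) (by simp)
    have hpost : ∀ n ∈ post, K (g x) < K n := by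
      intro n hn
      have := (List.pairwise_append.mp hpw).2.1
      rw [List.pairwise_cons] at this
      exact this.1 (K n) (List.mem_map_of_mem hn)
    -- block function for the shorter list
    set F : String → List α := fun n => PySem.List.sorted (xs.filter (fun e => g e == n)) k2 false with hF
    have hih : PySem.List.sorted2 xs (fun e => K (g e)) k2 false = (names.map F).flatten :=
      ih (fun y hy => hg y (by simp [hy]))
    set lt : α → α → Bool := fun a b =>
      decide (K (g a) < K (g b)) || (!decide (K (g b) < K (g a)) && decide (k2 a < k2 b)) with hlt
    have hstep : PySem.List.sorted2 (xs ++ [x]) (fun e => K (g e)) k2 false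
        = PySem.List.insertBy lt x (PySem.List.sorted2 xs (fun e => K (g e)) k2 false) := by
      rw [sorted2_eq_foldl, sorted2_eq_foldl, List.foldl_append, List.foldl_cons, List.foldl_nil]
    -- blocks of pre and post are unchanged by appending x
    have hfilter : ∀ n : String, g x ≠ n →
        (xs ++ [x]).filter (fun e => g e == n) = xs.filter (fun e => g e == n) := by
      intro n hne
      rw [List.filter_append]
      simp [hne]
    -- the g x block gains x by a k2-insertion
    have hgxblock : PySem.List.sorted ((xs ++ [x]).filter (fun e => g e == g x)) k2 false
        = PySem.List.insertBy (fun a b => decide (k2 a < k2 b)) x (F (g x)) := by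
      rw [List.filter_append]
      simp only [List.filter_cons, List.filter_nil, beq_self_eq_true, if_pos, hF]
      rw [PySem.List.sorted_eq_foldl_insertBy, List.foldl_append, List.foldl_cons, List.foldl_nil,
        PySem.List.sorted_eq_foldl_insertBy]
    have hmapPre : ∀ n ∈ pre,
        PySem.List.sorted ((xs ++ [x]).filter (fun e => g e == n)) k2 false = F n := by
      intro n hn
      rw [hfilter n (by intro hEq; exact absurd (hEq ▸ hpre n hn) (lt_irrefl _))]
    have hmapPost : ∀ n ∈ post,
        PySem.List.sorted ((xs ++ [x]).filter (fun e => g e == n)) k2 false = F n := by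
      intro n hn
      rw [hfilter n (by intro hEq; exact absurd (hEq ▸ hpost n hn) (lt_irrefl _))]
    rw [hstep, hih, hnames]
    rw [List.map_append, List.map_cons, List.flatten_append, List.flatten_cons,
      List.map_append, List.map_cons, List.flatten_append, List.flatten_cons]
    rw [List.map_congr_left hmapPre, List.map_congr_left hmapPost, hgxblock]
    -- insert x past the pre blocks
    rw [insertBy_append_of_forall_false lt x ((pre.map F).flatten)]
    · congr 1
      -- insert x before all the post blocks
      rw [insertBy_append_of_forall_true lt x (F (g x)) ((post.map F).flatten)]
      · congr 1
        apply insertBy_congr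
        intro e he
        rcases mem_block g k2 xs (g x) e he with ⟨hge, _⟩
        rw [hlt]
        simp [hge]
      · intro e he
        rcases List.mem_flatten.mp he with ⟨blk, hblk, heblk⟩
        rcases List.mem_map.mp hblk with ⟨n, hn, hFn⟩
        have he' : e ∈ F n := by rw [hFn]; exact heblk
        rcases mem_block g k2 xs n e (by simpa [hF] using he') with ⟨hge, _⟩
        rw [hlt]
        simp [hge, hpost n hn]
    · intro e he
      rcases List.mem_flatten.mp he with ⟨blk, hblk, heblk⟩
      rcases List.mem_map.mp hblk with ⟨n, hn, hFn⟩
      have he' : e ∈ F n := by rw [hFn]; exact heblk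
      rcases mem_block g k2 xs n e (by simpa [hF] using he') with ⟨hge, _⟩
      rw [hlt]
      have h1 : K n < K (g x) := hpre n hn
      simp [hge, h1, not_lt_of_gt h1]

-- characterisation of A's grouping dict
theorem groups_getD (sf : List String) (n : String) :
    (sf.foldl (fun d f => d.modify (pyPartName f) [] (fun l => l ++ [(pyPartAfter f, f)]))
        PySem.Dict.empty).getD n []
      = (sf.filter (fun f => pyPartName f == n)).map (fun f => (pyPartAfter f, f)) := by
  have h := PySem.Dict.getD_foldl_modify_append
    (sf.map (fun f => (pyPartName f, (pyPartAfter f, f)))) PySem.Dict.empty n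
  rw [List.foldl_map] at h
  simpa [List.filter_map, Function.comp, List.map_map, PySem.Dict.getD_empty] using h

theorem groups_keys (sf : List String) :
    (sf.foldl (fun d f => d.modify (pyPartName f) [] (fun l => l ++ [(pyPartAfter f, f)]))
        PySem.Dict.empty).keys
      = PySem.Set.ofList (sf.map pyPartName) := by
  have h := PySem.Dict.keys_foldl_modify_key sf pyPartName ([] : List (String × String))
    (fun _ f l => l ++ [(pyPartAfter f, f)]) PySem.Dict.empty
  simpa [PySem.Dict.keys_empty, PySem.Set.update_nil_left] using h

theorem groups_keys_nodup (sf : List String) :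
    (sf.foldl (fun d f => d.modify (pyPartName f) [] (fun l => l ++ [(pyPartAfter f, f)]))
        PySem.Dict.empty).keys.Nodup := by
  have h := PySem.Dict.nodup_keys_foldl_modify_key sf pyPartName ([] : List (String × String))
    (fun _ f l => l ++ [(pyPartAfter f, f)]) PySem.Dict.empty (by simp [PySem.Dict.keys_empty])
  exact h

-- characterisation of B's first-appearance-index dict
theorem gi_items (sf : List String) :
    (sf.foldl (fun d f => if d.contains (pyPartName f) then d
        else d.insert (pyPartName f) (d.size : Int)) PySem.Dict.empty).items
      = (PySem.Set.ofList (sf.map pyPartName) : List String).zipIdx.map (fun p => (p.1, (p.2 : Int))) := by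
  induction sf using List.reverseRecOn with
  | nil => simp [PySem.Dict.empty, PySem.Set.ofList_nil]
  | append_singleton sf f ih =>
    rw [List.foldl_append, List.foldl_cons, List.foldl_nil, List.map_append, List.map_cons,
      List.map_nil, PySem.Set.ofList_append_singleton]
    set d := sf.foldl (fun d f => if d.contains (pyPartName f) then d
        else d.insert (pyPartName f) (d.size : Int)) PySem.Dict.empty with hd
    set names : List String := (PySem.Set.ofList (sf.map pyPartName) : List String) with hN
    have hkeys : d.keys = names := by
      show d.items.map Prod.fst = names
      rw [ih, List.map_map]
      simp only [Function.comp_def]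
      exact zipIdx_fst names 0
    by_cases hm : pyPartName f ∈ names
    · have hc : d.contains (pyPartName f) = true := by
        rw [PySem.Dict.contains_eq_decide_mem_keys, hkeys]
        simpa using hm
      rw [if_pos hc, PySem.Set.add_of_mem (by simpa [hN] using hm), ih]
    · have hc : d.contains (pyPartName f) = false := by
        rw [PySem.Dict.contains_eq_decide_mem_keys, hkeys]
        simpa using hm
      have hsize : d.size = names.length := by
        show d.items.length = names.length
        rw [ih]; simp
      rw [if_neg (by simp [hc]), PySem.Dict.items_insert_of_not_contains d _ hc, ih,
        PySem.Set.add_of_not_mem (by simpa [hN] using hm)]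
      show _ = ((names ++ [pyPartName f]).zipIdx.map (fun p => (p.1, (p.2 : Int))))
      rw [List.zipIdx_append, List.map_append]
      simp [hsize]

theorem gi_getD (sf : List String) (i : Nat)
    (hi : i < (PySem.Set.ofList (sf.map pyPartName) : List String).length) :
    (sf.foldl (fun d f => if d.contains (pyPartName f) then d
        else d.insert (pyPartName f) (d.size : Int)) PySem.Dict.empty).getD
      ((PySem.Set.ofList (sf.map pyPartName) : List String)[i]) 0 = (i : Int) := by
  set d := sf.foldl (fun d f => if d.contains (pyPartName f) then d
      else d.insert (pyPartName f) (d.size : Int)) PySem.Dict.empty with hd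
  set names : List String := (PySem.Set.ofList (sf.map pyPartName) : List String) with hN
  have hmem : (names[i], (i : Int)) ∈ d.items := by
    rw [gi_items]
    refine List.mem_map.mpr ⟨(names[i], i), ?_, rfl⟩
    have : names.zipIdx[i]'(by simpa using hi) = (names[i], i) := by
      simp [List.getElem_zipIdx]
    exact this ▸ List.getElem_mem _
  have hkeys : d.keys = names := by
    show d.items.map Prod.fst = names
    rw [gi_items, List.map_map, hN]
    simp only [Function.comp_def]
    exact zipIdx_fst (PySem.Set.ofList (sf.map pyPartName) : List String) 0
  exact PySem.Dict.getD_of_mem_items d hmem (by rw [hkeys]; exact PySem.Set.nodup_ofList _) 0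

theorem gi_pairwise (sf : List String) :
    (((PySem.Set.ofList (sf.map pyPartName) : List String)).map
        (fun n => (sf.foldl (fun d f => if d.contains (pyPartName f) then d
          else d.insert (pyPartName f) (d.size : Int)) PySem.Dict.empty).getD n 0)).Pairwise (· < ·) := by
  rw [List.pairwise_iff_getElem]
  intro i j hi hj hij
  simp only [List.getElem_map]
  rw [gi_getD sf i (by simpa using hi), gi_getD sf j (by simpa using hj)]
  exact_mod_cast hij

-- A computes the flattened per-group sorts over the first-appearance group order
theorem arrange_features_eq_blocks (sf : List String) :
    arrange_features sf
      = ((PySem.Set.ofList (sf.map pyPartName) : List String).map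
          (fun n => PySem.List.sorted (sf.filter (fun f => pyPartName f == n)) pyPartAfter false)).flatten := by
  show (List.foldl _ [] _) = _
  rw [PySem.List.foldl_append_eq_flatMap, List.nil_append,
    PySem.Dict.items_eq_map_keys _ (groups_keys_nodup sf) [], groups_keys, List.flatMap_map]
  rw [List.flatMap_eq_foldl]
  rw [show (fun (acc : List String) (n : String) => acc ++
      (PySem.List.sorted ((n, (sf.foldl (fun d f => d.modify (pyPartName f) []
        (fun l => l ++ [(pyPartAfter f, f)])) PySem.Dict.empty).getD n [])).2
        (fun x => x.1) false).map (fun x => x.2)) = (fun acc n => acc ++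
      (PySem.List.sorted (sf.filter (fun f => pyPartName f == n)) pyPartAfter false)) from ?_]
  · rw [PySem.List.foldl_append_eq_flatMap, List.nil_append, List.flatMap_def]
  · funext acc n
    rw [groups_getD]
    congr 1
    rw [sorted_map (fun f => (pyPartAfter f, f)) (fun x => x.1) _, List.map_map]
    simp [Function.comp_def]

-- ===== VERDICT (by name: the statement is the Claim_ definition above) =====
theorem arrange_features_spec : Claim_equal_arrange_features := by
  intro sf _
  show arrange_features sf = arrange_features_alt sf
  rw [arrange_features_eq_blocks]
  show _ = PySem.List.sorted2 sf _ _ false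
  rw [sorted2_split pyPartName
      (fun n => (sf.foldl (fun d f => if d.contains (pyPartName f) then d
        else d.insert (pyPartName f) (d.size : Int)) PySem.Dict.empty).getD n 0)
      pyPartAfter (PySem.Set.ofList (sf.map pyPartName) : List String)
      (gi_pairwise sf) sf
      (fun f hf => (PySem.Set.mem_ofList _ _).mpr (List.mem_map_of_mem hf))]
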